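-- pv_equiv track=rewrite | github.com/simi-zat/kodimcz | uvod_do_programovani_2/06_json/format_json/03_narozeniny_ve_skolce.py | order_kids
-- ===== SOURCE A (Python) =====
-- def order_kids(deti:list[str]) -> dict:
--     ret = {}
--     for d in deti:
--         dob = d[2].split(". ")
--         if dob[1] not in ret:
--             ret[dob[1]] = []
--
--         ret[dob[1]].append(d[0])
--     return ret
-- ===== SOURCE B (Python) =====
-- def order_kids(deti: list[str]) -> dict:
--     pairs = [(d[2].split(". ")[1], d[0]) for d in deti]
--     months = dict.fromkeys(m for m, _ in pairs)
--     return {m: [n for mm, n in pairs if mm == m] for m in months}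
-- ===== Notes on version B (the rewrite author's own statement) =====
-- stated objective: alternative
-- what changed: B extracts all (month, name) pairs in one comprehension, deduplicates the months in first-occurrence order with dict.fromkeys, and builds each month's name list by filtering the pair list, instead of A's incremental dict-of-lists mutation inside one loop.
import Mathlib
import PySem

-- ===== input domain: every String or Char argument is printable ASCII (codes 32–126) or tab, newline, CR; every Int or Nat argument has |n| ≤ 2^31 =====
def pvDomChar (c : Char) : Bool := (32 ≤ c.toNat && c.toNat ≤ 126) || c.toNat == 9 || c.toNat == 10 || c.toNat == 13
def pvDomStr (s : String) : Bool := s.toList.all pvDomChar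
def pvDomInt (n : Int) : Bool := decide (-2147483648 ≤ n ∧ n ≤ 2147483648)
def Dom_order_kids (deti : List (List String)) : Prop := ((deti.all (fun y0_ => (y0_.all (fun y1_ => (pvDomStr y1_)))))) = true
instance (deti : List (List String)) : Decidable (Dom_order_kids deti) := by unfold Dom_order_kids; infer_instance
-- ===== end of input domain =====

-- B builds the groups by extracting (month, name) pairs once, deduplicating the months in
-- first-occurrence order, and filtering the pair list per month, instead of A's incremental
-- dict-of-lists mutation; same cost class, different decomposition.


-- ===== PORT A =====
-- 'ret' is a dict month ↦ list of names; each step mirrors A: d[2].split(". "),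
-- conditional insertion of an empty list, then append (ret[k].append(v) = modify k (· ++ [v])).
def order_kids (deti : List (List String)) : List (String × List String) :=
  (deti.foldl (fun ret d =>
    let dob := (PySem.Str.split? ((PySem.List.pyGet? d 2).getD "") ". ").getD []
    let m := (PySem.List.pyGet? dob 1).getD ""
    let ret := if ret.contains m then ret else ret.insert m []
    ret.modify m [] (fun v => v ++ [(PySem.List.pyGet? d 0).getD ""])
  ) PySem.Dict.empty).items

-- ===== PORT B =====
-- pairs = [(d[2].split(". ")[1], d[0]) for d in deti]; months = dict.fromkeys(...) = Set.ofList;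
-- result = {m: [n for mm, n in pairs if mm == m] for m in months}
def order_kids_alt (deti : List (List String)) : List (String × List String) :=
  let pairs := deti.map (fun d =>
    ((PySem.List.pyGet? ((PySem.Str.split? ((PySem.List.pyGet? d 2).getD "") ". ").getD []) 1).getD "",
     (PySem.List.pyGet? d 0).getD ""))
  let months := PySem.Set.ofList (pairs.map Prod.fst)
  months.map (fun m => (m, (pairs.filter (fun p => p.1 == m)).map Prod.snd))

-- ===== PRECONDITION & SPEC =====
-- Pre_ excludes exactly the inputs on which Python A raises IndexError: a kid record with
-- fewer than 3 fields, or a third field in which ". " does not occur (split yields < 2 parts).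
def Pre_order_kids (deti : List (List String)) : Prop :=
  ∀ d ∈ deti, 3 ≤ d.length ∧
    2 ≤ ((PySem.Str.split? (d.getD 2 "") ". ").getD []).length
instance (deti : List (List String)) : Decidable (Pre_order_kids deti) := by unfold Pre_order_kids; infer_instance
def pvWitness_order_kids : List (List String) :=
  [["Adam", "a", "1. 5. 2019"], ["Eva", "b", "2. 6. 2019"], ["Ota", "c", "9. 5. 2020"]]
def Spec_order_kids (deti : List (List String)) (out : List (String × List String)) : Prop := out = order_kids_alt deti
instance (deti : List (List String)) (out : List (String × List String)) : Decidable (Spec_order_kids deti out) := by unfold Spec_order_kids; infer_instance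

-- ===== CLAIM (what is proved, stated in full; the proofs are below) =====
def Claim_equal_order_kids : Prop := ∀ (deti : List (List String)), Dom_order_kids deti → Pre_order_kids deti → Spec_order_kids deti (order_kids deti)

-- ===== LEMMAS AND PROOFS =====

-- the (month, name) extraction both ports share
def pvKV (d : List String) : String × String :=
  ((PySem.List.pyGet? ((PySem.Str.split? ((PySem.List.pyGet? d 2).getD "") ". ").getD []) 1).getD "",
   (PySem.List.pyGet? d 0).getD "")

-- A's loop body: the conditional empty-list insertion is absorbed by modify
lemma step_eq (ret : PySem.Dict String (List String)) (m n : String) :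
    (if ret.contains m then ret else ret.insert m []).modify m [] (fun v => v ++ [n])
      = ret.modify m [] (fun v => v ++ [n]) := by
  cases hc : ret.contains m with
  | true => simp
  | false =>
    simp only [Bool.false_eq_true, if_false]
    unfold PySem.Dict.modify
    simp [PySem.Dict.getD_insert_self, PySem.Dict.insert_insert_self,
      PySem.Dict.getD_of_not_contains ret [] hc]

lemma fold_eq (deti : List (List String)) :
    (deti.foldl (fun ret d =>
      let dob := (PySem.Str.split? ((PySem.List.pyGet? d 2).getD "") ". ").getD []
      let m := (PySem.List.pyGet? dob 1).getD ""
      let ret := if ret.contains m then ret else ret.insert m []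
      ret.modify m [] (fun v => v ++ [(PySem.List.pyGet? d 0).getD ""])) PySem.Dict.empty)
    = ((deti.map pvKV).foldl (fun ret p => ret.modify p.1 [] (fun v => v ++ [p.2])) PySem.Dict.empty) := by
  rw [List.foldl_map]
  congr 1
  funext ret d
  simpa [pvKV] using step_eq ret (pvKV d).1 (pvKV d).2

-- ===== VERDICT (by name: the statement is the Claim_ definition above) =====
theorem order_kids_spec : Claim_equal_order_kids := by
  intro deti _ _
  unfold Spec_order_kids order_kids order_kids_alt
  rw [fold_eq]
  set ps := deti.map pvKV with hps
  have hnd : ((ps.foldl (fun ret p => ret.modify p.1 [] (fun v => v ++ [p.2])) PySem.Dict.empty)).keys.Nodup :=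
    PySem.Dict.nodup_keys_foldl_modify_key ps Prod.fst [] (fun _ p => (fun v => v ++ [p.2])) PySem.Dict.empty
      PySem.Dict.nodup_keys_empty
  rw [PySem.Dict.items_eq_map_keys _ hnd []]
  rw [PySem.Dict.keys_foldl_modify_key ps Prod.fst [] (fun _ p => (fun v => v ++ [p.2])) PySem.Dict.empty]
  have hkeys : (PySem.Dict.empty : PySem.Dict String (List String)).keys = [] := rfl
  rw [hkeys, PySem.Set.update_nil_left]
  show _ = (PySem.Set.ofList (List.map Prod.fst ps)).map
      (fun m => (m, List.map Prod.snd (List.filter (fun p => p.1 == m) ps)))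
  apply List.map_congr_left
  intro m _
  rw [PySem.Dict.getD_foldl_modify_append ps PySem.Dict.empty m]
  simp [PySem.Dict.getD_empty]
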